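-- pv_equiv track=rewrite | github.com/avinashrulz/PythonDump | Nptel_python_Programming_Week4.py | mystery
-- ===== SOURCE A (Python) =====
-- def mystery(l):
--   if (l == []):
--     return(l)
--   else:
--     mid = len(l)//2
--     if (len(l)%2 == 0):
--       return l[mid-1:mid+1] + mystery(l[:mid-1]+l[mid+1:])
--     else:
--       return l[mid:mid+1] + mystery(l[:mid]+l[mid+1:])
-- ===== SOURCE B (Python) =====
-- def mystery(l):
--     # Center-out two-pointer: emit the middle, then walk outward left/right.  O(n) vs A's O(n^2) slicing recursion.
--     n = len(l)
--     out = []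
--     if n % 2:
--         m = n // 2
--         out.append(l[m])
--         i, j = m - 1, m + 1
--     else:
--         i, j = n // 2 - 1, n // 2
--     while i >= 0:
--         out.append(l[i])
--         out.append(l[j])
--         i -= 1
--         j += 1
--     return out
-- ===== Notes on version B (the rewrite author's own statement) =====
-- stated objective: faster
-- what changed: A rebuilds the list by recursive slicing (each step copies the list minus its middle); B never rebuilds anything: it emits the middle element (odd length) and then walks two pointers outward from the center over the unchanged list.
import Mathlib
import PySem

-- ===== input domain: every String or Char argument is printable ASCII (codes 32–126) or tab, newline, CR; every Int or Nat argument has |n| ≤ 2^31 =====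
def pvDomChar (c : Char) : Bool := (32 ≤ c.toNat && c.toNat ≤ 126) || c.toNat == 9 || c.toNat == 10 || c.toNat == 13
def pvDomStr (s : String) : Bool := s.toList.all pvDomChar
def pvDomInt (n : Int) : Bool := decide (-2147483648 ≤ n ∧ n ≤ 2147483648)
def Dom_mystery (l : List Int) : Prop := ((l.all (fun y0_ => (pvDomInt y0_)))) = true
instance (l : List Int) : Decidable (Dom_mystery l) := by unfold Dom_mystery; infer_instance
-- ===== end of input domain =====

-- B replaces A's slice-and-recurse with a center-out two-pointer walk over the unchanged list.

-- termination helper for port A (the recursive argument is one/two elements shorter)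
theorem pvRestLen_lt (l : List Int) (a b : Int) (ha : 0 ≤ a) (hab : a < b)
    (han : a < (l.length : Int)) :
    (PySem.List.slice l none (some a) ++ PySem.List.slice l (some b) none).length < l.length := by
  rw [PySem.List.slice_to l ha, PySem.List.slice_from l (by omega)]
  simp only [List.length_append, List.length_take, List.length_drop]
  omega

-- ===== PORT A =====
def mystery (l : List Int) : List Int :=
  if l = [] then l
  else
    let mid : Int := PySem.Int.floordiv (l.length : Int) 2
    if PySem.Int.mod (l.length : Int) 2 = 0 then
      PySem.List.slice l (some (mid - 1)) (some (mid + 1)) ++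
        mystery (PySem.List.slice l none (some (mid - 1)) ++ PySem.List.slice l (some (mid + 1)) none)
    else
      PySem.List.slice l (some mid) (some (mid + 1)) ++
        mystery (PySem.List.slice l none (some mid) ++ PySem.List.slice l (some (mid + 1)) none)
termination_by l.length
decreasing_by
  · rename_i hne hpar
    have hfd := PySem.Int.floordiv_eq_ediv_of_pos (a := (l.length : Int)) (b := 2) (by omega)
    have hmd := PySem.Int.mod_eq_emod_of_pos (a := (l.length : Int)) (b := 2) (by omega)
    have hlen : 1 ≤ l.length := List.length_pos_iff.mpr hne
    exact pvRestLen_lt l _ _ (by omega) (by omega) (by omega)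
  · rename_i hne _
    have hfd := PySem.Int.floordiv_eq_ediv_of_pos (a := (l.length : Int)) (b := 2) (by omega)
    have hlen : 1 ≤ l.length := List.length_pos_iff.mpr hne
    exact pvRestLen_lt l _ _ (by omega) (by omega) (by omega)

-- ===== PORT B =====
-- the while-loop of Source B: emit l[i], l[j] while i >= 0, moving i left and j right
def mysteryLoop (l : List Int) (i j : Int) : List Int :=
  if h : 0 ≤ i then
    PySem.List.pyGetD l i 0 :: PySem.List.pyGetD l j 0 :: mysteryLoop l (i - 1) (j + 1)
  else []
termination_by (i + 1).toNat
decreasing_by omega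

def mystery_alt (l : List Int) : List Int :=
  let n : Int := l.length
  if PySem.Int.mod n 2 = 0 then
    mysteryLoop l (PySem.Int.floordiv n 2 - 1) (PySem.Int.floordiv n 2)
  else
    let m : Int := PySem.Int.floordiv n 2
    PySem.List.pyGetD l m 0 :: mysteryLoop l (m - 1) (m + 1)

-- ===== PRECONDITION & SPEC =====
def Spec_mystery (l : List Int) (out : List Int) : Prop := out = mystery_alt l
instance (l : List Int) (out : List Int) : Decidable (Spec_mystery l out) := by unfold Spec_mystery; infer_instance

-- ===== CLAIM (what is proved, stated in full; the proofs are below) =====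
def Claim_equal_mystery : Prop := ∀ (l : List Int), Dom_mystery l → Spec_mystery l (mystery l)

-- ===== LEMMAS AND PROOFS =====

-- the common value of both programs: interleave the reversed left half with the right half
def pvIlv : List Int → List Int → List Int
  | [], _ => []
  | _ :: _, [] => []
  | x :: a, y :: b => x :: y :: pvIlv a b

theorem mysteryLoop_eq_ilv (a : List Int) : ∀ (g b : List Int), a.length = b.length →
    mysteryLoop (a.reverse ++ g ++ b) ((a.length : Int) - 1) ((a.length : Int) + (g.length : Int)) = pvIlv a b := by
  induction a with
  | nil =>
    intro g b hb
    have : b = [] := by simpa using hb.symm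
    subst this
    rw [mysteryLoop]
    simp [pvIlv]
  | cons x a ih =>
    intro g b hb
    cases b with
    | nil => simp at hb
    | cons y b =>
      have hb' : a.length = b.length := by simpa using hb
      rw [mysteryLoop, dif_pos (by simp only [List.length_cons]; push_cast; omega)]
      have hL : (x :: a).reverse ++ g ++ (y :: b) =
          a.reverse ++ ([x] ++ g ++ [y]) ++ b := by simp
      have hx : PySem.List.pyGetD ((x :: a).reverse ++ g ++ (y :: b)) (((x :: a).length : Int) - 1) 0 = x := by
        have h1 : (((x :: a).length : Int) - 1) = ((a.reverse.length : Nat) : Int) := by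
          simp only [List.length_cons, List.length_reverse]; push_cast; omega
        rw [h1, PySem.List.pyGetD_natCast]
        have h2 : (x :: a).reverse ++ g ++ (y :: b) = a.reverse ++ (x :: (g ++ y :: b)) := by simp
        rw [h2]
        simp [List.getD]
      have hy : PySem.List.pyGetD ((x :: a).reverse ++ g ++ (y :: b)) (((x :: a).length : Int) + (g.length : Int)) 0 = y := by
        have h1 : (((x :: a).length : Int) + (g.length : Int)) = (((a.reverse ++ [x] ++ g).length : Nat) : Int) := by
          simp only [List.length_cons, List.length_append, List.length_reverse, List.length_nil]; push_cast; omega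
        rw [h1, PySem.List.pyGetD_natCast]
        have h2 : (x :: a).reverse ++ g ++ (y :: b) = (a.reverse ++ [x] ++ g) ++ (y :: b) := by simp
        rw [h2]
        simp [List.getD]
      have hrec : mysteryLoop ((x :: a).reverse ++ g ++ (y :: b)) (((x :: a).length : Int) - 1 - 1) (((x :: a).length : Int) + (g.length : Int) + 1) = pvIlv a b := by
        have h1 : (((x :: a).length : Int) - 1 - 1) = ((a.length : Int) - 1) := by
          simp only [List.length_cons]; push_cast; omega
        have h2 : (((x :: a).length : Int) + (g.length : Int) + 1) = ((a.length : Int) + ((([x] ++ g ++ [y]).length : Nat) : Int)) := by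
          simp only [List.length_cons, List.length_append, List.length_nil]; push_cast; omega
        rw [h1, h2, hL]
        exact ih ([x] ++ g ++ [y]) b hb'
      rw [hx, hy, hrec]
      rfl

theorem mystery_even (a : List Int) : ∀ b : List Int, a.length = b.length →
    mystery (a.reverse ++ b) = pvIlv a b := by
  induction a with
  | nil =>
    intro b hb
    have : b = [] := by simpa using hb.symm
    subst this
    rw [mystery]
    simp [pvIlv]
  | cons x a ih =>
    intro b hb
    cases b with
    | nil => simp at hb
    | cons y b =>
      have hb' : a.length = b.length := by simpa using hb
      have hL : (x :: a).reverse ++ (y :: b) = a.reverse ++ (x :: y :: b) := by simp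
      rw [hL, mystery]
      have hne : a.reverse ++ (x :: y :: b) ≠ [] := by simp
      rw [if_neg hne]
      have hlen : (a.reverse ++ (x :: y :: b)).length = 2 * a.length + 2 := by
        simp only [List.length_append, List.length_reverse, List.length_cons]; omega
      have hmid : PySem.Int.floordiv (((a.reverse ++ (x :: y :: b)).length : Int)) 2 = (a.length : Int) + 1 := by
        rw [PySem.Int.floordiv_eq_ediv_of_pos (by omega), hlen]; push_cast; omega
      have hmod : PySem.Int.mod (((a.reverse ++ (x :: y :: b)).length : Int)) 2 = 0 := by
        rw [PySem.Int.mod_eq_emod_of_pos (by omega), hlen]; push_cast; omega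
      rw [hmid, hmod, if_pos rfl]
      have hsl1 : PySem.List.slice (a.reverse ++ (x :: y :: b)) (some ((a.length : Int) + 1 - 1)) (some ((a.length : Int) + 1 + 1)) = [x, y] := by
        rw [PySem.List.slice_toNat _ (by omega) (by omega)]
        have h1 : ((a.length : Int) + 1 - 1).toNat = a.reverse.length := by simp
        have h2 : ((a.length : Int) + 1 + 1).toNat - ((a.length : Int) + 1 - 1).toNat = 2 := by omega
        rw [h2, h1, List.drop_left]
        rfl
      have hsl2 : PySem.List.slice (a.reverse ++ (x :: y :: b)) none (some ((a.length : Int) + 1 - 1)) = a.reverse := by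
        rw [PySem.List.slice_to _ (by omega)]
        have h1 : ((a.length : Int) + 1 - 1).toNat = a.reverse.length := by simp
        rw [h1, List.take_left]
      have hsl3 : PySem.List.slice (a.reverse ++ (x :: y :: b)) (some ((a.length : Int) + 1 + 1)) none = b := by
        rw [PySem.List.slice_from _ (by omega)]
        have h2 : a.reverse ++ (x :: y :: b) = (a.reverse ++ [x, y]) ++ b := by simp
        have h1 : ((a.length : Int) + 1 + 1).toNat = (a.reverse ++ [x, y]).length := by simp; omega
        rw [h1, h2, List.drop_left]
      rw [hsl1, hsl2, hsl3, ih b hb']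
      rfl

theorem mystery_odd (a : List Int) (x : Int) (b : List Int) (hb : a.length = b.length) :
    mystery (a.reverse ++ x :: b) = x :: pvIlv a b := by
  rw [mystery]
  have hne : a.reverse ++ x :: b ≠ [] := by simp
  rw [if_neg hne]
  have hlen : (a.reverse ++ x :: b).length = 2 * a.length + 1 := by
    simp only [List.length_append, List.length_reverse, List.length_cons]; omega
  have hmid : PySem.Int.floordiv (((a.reverse ++ x :: b).length : Int)) 2 = (a.length : Int) := by
    rw [PySem.Int.floordiv_eq_ediv_of_pos (by omega), hlen]; push_cast; omega
  have hmod : PySem.Int.mod (((a.reverse ++ x :: b).length : Int)) 2 = 1 := by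
    rw [PySem.Int.mod_eq_emod_of_pos (by omega), hlen]; push_cast; omega
  rw [hmid, hmod, if_neg (by omega)]
  have hsl1 : PySem.List.slice (a.reverse ++ x :: b) (some ((a.length : Int))) (some ((a.length : Int) + 1)) = [x] := by
    rw [PySem.List.slice_toNat _ (by omega) (by omega)]
    have h1 : ((a.length : Int)).toNat = a.reverse.length := by simp
    have h2 : ((a.length : Int) + 1).toNat - ((a.length : Int)).toNat = 1 := by omega
    rw [h2, h1, List.drop_left]
    rfl
  have hsl2 : PySem.List.slice (a.reverse ++ x :: b) none (some ((a.length : Int))) = a.reverse := by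
    rw [PySem.List.slice_to _ (by omega)]
    have h1 : ((a.length : Int)).toNat = a.reverse.length := by simp
    rw [h1, List.take_left]
  have hsl3 : PySem.List.slice (a.reverse ++ x :: b) (some ((a.length : Int) + 1)) none = b := by
    rw [PySem.List.slice_from _ (by omega)]
    have h2 : a.reverse ++ x :: b = (a.reverse ++ [x]) ++ b := by simp
    have h1 : ((a.length : Int) + 1).toNat = (a.reverse ++ [x]).length := by simp
    rw [h1, h2, List.drop_left]
  rw [hsl1, hsl2, hsl3, mystery_even a b hb]
  rfl

-- ===== VERDICT (by name: the statement is the Claim_ definition above) =====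
theorem mystery_spec : Claim_equal_mystery := by
  intro l _
  unfold Spec_mystery mystery_alt
  dsimp only
  by_cases hpar : l.length % 2 = 0
  · -- even length: l = a.reverse ++ b with |a| = |b| = l.length / 2
    set k := l.length / 2 with hk
    have hkle : k ≤ l.length := Nat.div_le_self _ _
    set a : List Int := (l.take k).reverse with ha
    set b : List Int := l.drop k with hbd
    have har : a.reverse = l.take k := by rw [ha, List.reverse_reverse]
    have hal : a.length = k := by rw [ha]; simp; omega
    have hbl : b.length = l.length - k := by rw [hbd]; simp
    have hL : l = a.reverse ++ b := by rw [har, hbd, List.take_append_drop]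
    have hab : a.length = b.length := by omega
    have hmod : PySem.Int.mod ((l.length : Int)) 2 = 0 := by
      rcases Nat.eq_zero_or_pos l.length with h0 | h0
      · simp [h0, PySem.Int.mod]
      · rw [PySem.Int.mod_eq_emod_of_pos (by omega)]; omega
    have hmid : PySem.Int.floordiv ((l.length : Int)) 2 = (k : Int) := by
      rcases Nat.eq_zero_or_pos l.length with h0 | h0
      · simp [h0, PySem.Int.floordiv]; omega
      · rw [PySem.Int.floordiv_eq_ediv_of_pos (by omega)]; omega
    rw [hmod, hmid, if_pos rfl, hL, mystery_even a b hab]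
    have := mysteryLoop_eq_ilv a [] b hab
    simp only [List.append_nil, List.length_nil, Nat.cast_zero, add_zero] at this
    rw [hal] at this
    exact this.symm
  · -- odd length: l = a.reverse ++ x :: b with |a| = |b| = l.length / 2
    set k := l.length / 2 with hk
    have hkn : k < l.length := by omega
    set a : List Int := (l.take k).reverse with ha
    set x : Int := l[k] with hx
    set b : List Int := l.drop (k + 1) with hbd
    have har : a.reverse = l.take k := by rw [ha, List.reverse_reverse]
    have hal : a.length = k := by rw [ha]; simp; omega
    have hbl : b.length = l.length - (k + 1) := by rw [hbd]; simp
    have hL : l = a.reverse ++ x :: b := by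
      rw [har, hbd, hx, ← List.drop_eq_getElem_cons hkn, List.take_append_drop]
    have hab : a.length = b.length := by omega
    have hmod : PySem.Int.mod ((l.length : Int)) 2 = 1 := by
      rw [PySem.Int.mod_eq_emod_of_pos (by omega)]; omega
    have hmid : PySem.Int.floordiv ((l.length : Int)) 2 = (k : Int) := by
      rw [PySem.Int.floordiv_eq_ediv_of_pos (by omega)]; omega
    simp only [hmod, hmid, if_neg (by omega : ¬ (1 : Int) = 0)]
    have hget : PySem.List.pyGetD l ((k : Int)) 0 = x := by
      rw [PySem.List.pyGetD_natCast]
      simp [List.getD, hx, List.getElem?_eq_getElem hkn]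
    have hloop : mysteryLoop l ((k : Int) - 1) ((k : Int) + 1) = pvIlv a b := by
      have := mysteryLoop_eq_ilv a [x] b hab
      simp only [List.length_cons, List.length_nil, Nat.cast_one, zero_add] at this
      rw [hal] at this
      rw [hL]
      convert this using 2
      all_goals simp
    rw [hget, hloop, hL, mystery_odd a x b hab]
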